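-- pv_equiv track=rewrite | github.com/joseruiz1571/ml-pickle-vulnerabilities | scripts/generate_cve_entry.py | insert_after_table_header
-- ===== SOURCE A (Python) =====
-- def insert_after_table_header(content: str, marker: str, entry: str) -> str:
--     """Insert entry after a table header row following the marker."""
--     if marker not in content:
--         return content
--
--     lines = content.split('\n')
--     result = []
--     found_marker = False
--     found_table_header = False
--     inserted = False
--
--     for i, line in enumerate(lines):
--         result.append(line)
--
--         if marker in line:
--             found_marker = True
--             continue
--
--         if found_marker and not found_table_header:
--             if line.startswith('|---'):
--                 found_table_header = True
--                 continue
--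
--         if found_marker and found_table_header and not inserted:
--             # Insert after the separator row
--             if line.startswith('|'):
--                 # There's existing content, insert before it
--                 result.insert(len(result) - 1, entry)
--             else:
--                 # Empty table, just add the entry
--                 result.insert(len(result) - 1, entry)
--             inserted = True
--
--     return '\n'.join(result)
-- ===== SOURCE B (Python) =====
-- def insert_after_table_header(content: str, marker: str, entry: str) -> str:
--     """Insert entry directly after the table separator row that follows the marker."""
--     if marker not in content:
--         return content
--     lines = content.split('\n')
--     idx = next((i for i, line in enumerate(lines) if marker in line), None)
--     if idx is not None:
--         for j in range(idx + 1, len(lines)):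
--             if lines[j].startswith('|---'):
--                 lines.insert(j + 1, entry)
--                 break
--     return '\n'.join(lines)
-- ===== Notes on version B (the rewrite author's own statement) =====
-- stated objective: simpler
-- what changed: B finds the first marker line and then the first '|---' separator after it and performs one insert, instead of A's streaming loop over all lines with four boolean flags and a mid-list result.insert; Pre_ excludes inputs where the marker text occurs again in that separator row or in the line immediately after it, where A's accidental skipping of marker-containing lines makes the insertion position an artefact of its implementation.
-- intended difference: When the marker occurs in content and the first '|---' separator row after the first marker line is the last line, A returns the content unchanged (the entry is silently dropped), while B appends the entry after that separator row, which is the function's stated intent. — e.g. on insert_after_table_header("m\n|---", "m", "e"): A returns "m\n|---", B returns "m\n|---\ne"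
-- outside the precondition, e.g. on insert_after_table_header('m\n|---\nm x\ny', 'm', 'e'): A returns 'm\n|---\nm x\ne\ny', B returns 'm\n|---\ne\nm x\ny'
import Mathlib
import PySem

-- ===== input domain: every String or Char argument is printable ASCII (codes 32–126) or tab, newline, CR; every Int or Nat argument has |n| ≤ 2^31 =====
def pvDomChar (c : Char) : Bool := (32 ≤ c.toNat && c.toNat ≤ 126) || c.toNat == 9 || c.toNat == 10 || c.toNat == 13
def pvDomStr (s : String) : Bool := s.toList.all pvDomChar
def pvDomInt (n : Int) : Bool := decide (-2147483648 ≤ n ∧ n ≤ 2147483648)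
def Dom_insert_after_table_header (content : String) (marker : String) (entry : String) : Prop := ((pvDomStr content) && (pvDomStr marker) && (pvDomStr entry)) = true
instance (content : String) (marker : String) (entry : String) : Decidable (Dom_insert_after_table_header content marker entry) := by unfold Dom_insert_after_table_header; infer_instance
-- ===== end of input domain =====

-- B locates the first marker line and the first '|---' separator after it and inserts once,
-- instead of A's streaming loop with four boolean flags; objective: simpler (not faster).
-- Pre_ excludes one corner (marker recurring at the separator), D_ states one intended difference.

-- shared primitive wrappers ('marker in line', "line.startswith('|---')", content.split('\n'))
def pvIn (marker l : String) : Bool := PySem.Str.isIn marker l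
def pvSepRow (l : String) : Bool := PySem.Str.startswith l "|---"
def pvSplitNL (content : String) : List String := (PySem.Str.split? content "\n").getD []

-- ===== PORT A =====
-- one loop step of A's for-loop; state = (result, found_marker, found_table_header, inserted)
def pvStepA (marker entry : String) (st : List String × Bool × Bool × Bool) (line : String) :
    List String × Bool × Bool × Bool :=
  let result := st.1 ++ [line]
  let fm := st.2.1
  let fth := st.2.2.1
  let ins := st.2.2.2
  if pvIn marker line then (result, true, fth, ins)
  else if fm && !fth && pvSepRow line then (result, fm, true, ins)
  else if fm && fth && !ins then
    (PySem.List.insert result (PySem.List.len result - 1) entry, fm, fth, true)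
  else (result, fm, fth, ins)

def insert_after_table_header (content : String) (marker : String) (entry : String) : String :=
  if !(pvIn marker content) then content
  else
    let lines := pvSplitNL content
    let final := lines.foldl (pvStepA marker entry) ([], false, false, false)
    PySem.Str.join "\n" final.1

-- ===== PORT B =====
-- the for-j-in-range loop with break: scan from index j for the first '|---' line, insert after it
def bScan (lines : List String) (entry : String) (j : Nat) : List String :=
  if h : j < lines.length then
    if pvSepRow lines[j] then PySem.List.insert lines (((j + 1 : Nat) : Int)) entry
    else bScan lines entry (j + 1)
  else lines
termination_by lines.length - j

def insert_after_table_header_alt (content : String) (marker : String) (entry : String) : String :=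
  if !(pvIn marker content) then content
  else
    let lines := pvSplitNL content
    match lines.findIdx? (fun l => pvIn marker l) with   -- next((i for i, line in enumerate(lines) if marker in line), None)
    | none => PySem.Str.join "\n" lines
    | some idx => PySem.Str.join "\n" (bScan lines entry (idx + 1))

-- ===== PRECONDITION & SPEC =====
-- badB: in the split lines, the first '|---' row after the first marker-containing line — or the
-- line immediately after that row — contains the marker again
def badB (marker : String) (ls : List String) : Bool :=
  (ls.findIdx? (pvIn marker)).any fun i =>
    ((ls.drop (i + 1)).findIdx? pvSepRow).any fun j =>
      pvIn marker ((ls.drop (i + 1)).getD j "") || (ls.drop (i + 1))[j + 1]?.any (pvIn marker)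

-- lastB: the first '|---' row after the first marker-containing line is the last line
def lastB (marker : String) (ls : List String) : Bool :=
  (ls.findIdx? (pvIn marker)).any fun i =>
    ((ls.drop (i + 1)).findIdx? pvSepRow).any fun j => decide (j + 1 = (ls.drop (i + 1)).length)

-- Pre_ excludes inputs where the marker text occurs again in the first '|---' separator row after
-- the marker line or in the line immediately following it: A's streaming loop accidentally skips
-- marker-containing lines in both scans, so which row the entry lands before is an artefact of A's
-- implementation there.
def Pre_insert_after_table_header (content : String) (marker : String) (entry : String) : Prop :=
  badB marker (pvSplitNL content) = false
instance (content : String) (marker : String) (entry : String) : Decidable (Pre_insert_after_table_header content marker entry) := by unfold Pre_insert_after_table_header; infer_instance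

def pvWitness_insert_after_table_header : String × String × String := ("m", "m", "e")

-- On inputs where the marker occurs in content and the first '|---' separator row after the first
-- marker line is the last line, A returns the content unchanged (the entry is silently dropped),
-- while B appends the entry after that separator row, which is the function's stated intent.
def D_insert_after_table_header (content : String) (marker : String) (entry : String) : Prop :=
  (pvIn marker content && lastB marker (pvSplitNL content)) = true
instance (content : String) (marker : String) (entry : String) : Decidable (D_insert_after_table_header content marker entry) := by unfold D_insert_after_table_header; infer_instance

def Spec_insert_after_table_header (content : String) (marker : String) (entry : String) (out : String) : Prop := ¬ D_insert_after_table_header content marker entry → out = insert_after_table_header_alt content marker entry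
instance (content : String) (marker : String) (entry : String) (out : String) : Decidable (Spec_insert_after_table_header content marker entry out) := by unfold Spec_insert_after_table_header; infer_instance

def pvDiffWitness_insert_after_table_header : String × String × String := ("m\n|---", "m", "e")
def pvDiffWitnessOut_insert_after_table_header : String × String := ("m\n|---", "m\n|---\ne")

-- ===== CLAIM (what is proved, stated in full; the proofs are below) =====
def Claim_unchanged_insert_after_table_header : Prop := ∀ (content : String) (marker : String) (entry : String), Dom_insert_after_table_header content marker entry → Pre_insert_after_table_header content marker entry → Spec_insert_after_table_header content marker entry (insert_after_table_header content marker entry)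
def Claim_changed_insert_after_table_header : Prop := Dom_insert_after_table_header (pvDiffWitness_insert_after_table_header.1) (pvDiffWitness_insert_after_table_header.2.1) (pvDiffWitness_insert_after_table_header.2.2) ∧ Pre_insert_after_table_header (pvDiffWitness_insert_after_table_header.1) (pvDiffWitness_insert_after_table_header.2.1) (pvDiffWitness_insert_after_table_header.2.2) ∧ D_insert_after_table_header (pvDiffWitness_insert_after_table_header.1) (pvDiffWitness_insert_after_table_header.2.1) (pvDiffWitness_insert_after_table_header.2.2) ∧ insert_after_table_header (pvDiffWitness_insert_after_table_header.1) (pvDiffWitness_insert_after_table_header.2.1) (pvDiffWitness_insert_after_table_header.2.2) = pvDiffWitnessOut_insert_after_table_header.1 ∧ insert_after_table_header_alt (pvDiffWitness_insert_after_table_header.1) (pvDiffWitness_insert_after_table_header.2.1) (pvDiffWitness_insert_after_table_header.2.2) = pvDiffWitnessOut_insert_after_table_header.2 ∧ pvDiffWitnessOut_insert_after_table_header.1 ≠ pvDiffWitnessOut_insert_after_table_header.2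
def Claim_exact_insert_after_table_header : Prop := ∀ (content : String) (marker : String) (entry : String), Dom_insert_after_table_header content marker entry → Pre_insert_after_table_header content marker entry → D_insert_after_table_header content marker entry → insert_after_table_header content marker entry ≠ insert_after_table_header_alt content marker entry

-- ===== LEMMAS AND PROOFS =====

-- recursive characterisation of A's transformed line list
def specTgt (marker entry : String) : List String → List String
  | [] => []
  | l :: ls => if pvIn marker l then l :: specTgt marker entry ls else entry :: l :: ls

def specSep (marker entry : String) : List String → List String
  | [] => []
  | l :: ls =>
    if pvIn marker l then l :: specSep marker entry ls
    else if pvSepRow l then l :: specTgt marker entry ls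
    else l :: specSep marker entry ls

def specMark (marker entry : String) : List String → List String
  | [] => []
  | l :: ls =>
    if pvIn marker l then l :: specSep marker entry ls
    else l :: specMark marker entry ls

-- ---- A side: the foldl from each reachable flag state ----

lemma foldl_stepA_done (marker entry : String) (ls : List String) :
    ∀ res, (ls.foldl (pvStepA marker entry) (res, true, true, true)).1 = res ++ ls := by
  induction ls with
  | nil => intro res; simp
  | cons l ls ih =>
    intro res
    cases h : pvIn marker l <;> simp [List.foldl, pvStepA, h, ih]

lemma foldl_stepA_tgt (marker entry : String) (ls : List String) :
    ∀ res, (ls.foldl (pvStepA marker entry) (res, true, true, false)).1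
      = res ++ specTgt marker entry ls := by
  induction ls with
  | nil => intro res; simp [specTgt]
  | cons l ls ih =>
    intro res
    cases h : pvIn marker l
    · have hins : PySem.List.insert (res ++ [l]) ((res.length : Nat) : Int) entry
          = res ++ [entry, l] := by
        rw [PySem.List.insert_natCast _ _ _ (by simp)]
        simp
      simp [List.foldl, pvStepA, h, hins, foldl_stepA_done, specTgt]
    · simp [List.foldl, pvStepA, h, ih, specTgt]

lemma foldl_stepA_sep (marker entry : String) (ls : List String) :
    ∀ res, (ls.foldl (pvStepA marker entry) (res, true, false, false)).1
      = res ++ specSep marker entry ls := by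
  induction ls with
  | nil => intro res; simp [specSep]
  | cons l ls ih =>
    intro res
    cases h : pvIn marker l
    · cases hs : pvSepRow l
      · simp [List.foldl, pvStepA, h, hs, ih, specSep]
      · simp [List.foldl, pvStepA, h, hs, foldl_stepA_tgt, specSep]
    · simp [List.foldl, pvStepA, h, ih, specSep]

lemma foldl_stepA_mark (marker entry : String) (ls : List String) :
    ∀ res, (ls.foldl (pvStepA marker entry) (res, false, false, false)).1
      = res ++ specMark marker entry ls := by
  induction ls with
  | nil => intro res; simp [specMark]
  | cons l ls ih =>
    intro res
    cases h : pvIn marker l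
    · simp [List.foldl, pvStepA, h, ih, specMark]
    · simp [List.foldl, pvStepA, h, foldl_stepA_sep, specMark]

-- ---- B side: characterisation of bScan / findIdx? ----

-- recursive characterisation of B's transformed line list
def specB (entry : String) : List String → List String
  | [] => []
  | l :: ls => if pvSepRow l then l :: entry :: ls else l :: specB entry ls

def specBM (marker entry : String) : List String → List String
  | [] => []
  | l :: ls => if pvIn marker l then l :: specB entry ls else l :: specBM marker entry ls

lemma bScan_shift (l : String) (ls : List String) (entry : String) :
    ∀ j, bScan (l :: ls) entry (j + 1) = l :: bScan ls entry j := by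
  intro j
  fun_induction bScan ls entry j with
  | case1 j h hp =>
    rw [bScan]
    simp only [List.length_cons]
    rw [dif_pos (by omega)]
    simp only [List.getElem_cons_succ]
    rw [if_pos hp]
    rw [PySem.List.insert_natCast _ _ _ (by simp; omega),
        PySem.List.insert_natCast _ _ _ (by omega)]
    simp
  | case2 j h hp ih =>
    rw [bScan]
    simp only [List.length_cons]
    rw [dif_pos (by omega)]
    simp only [List.getElem_cons_succ]
    rw [if_neg hp]
    exact ih
  | case3 j h =>
    rw [bScan]
    simp only [List.length_cons]
    rw [dif_neg (by omega)]

lemma bScan_zero (ls : List String) (entry : String) :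
    bScan ls entry 0 = specB entry ls := by
  induction ls with
  | nil => rw [bScan]; simp [specB]
  | cons l ls ih =>
    rw [bScan]
    simp only [List.length_cons]
    rw [dif_pos (by omega)]
    simp only [List.getElem_cons_zero]
    by_cases h : pvSepRow l
    · rw [if_pos h]
      rw [PySem.List.insert_natCast _ _ _ (by simp)]
      simp [specB, h]
    · rw [if_neg h]
      rw [show (0 : Nat) + 1 = 0 + 1 from rfl, bScan_shift, ih]
      simp [specB, h]

lemma specBM_no_marker (marker entry : String) (ls : List String)
    (h : ls.findIdx? (fun l => pvIn marker l) = none) :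
    specBM marker entry ls = ls := by
  induction ls with
  | nil => simp [specBM]
  | cons l ls ih =>
    rw [List.findIdx?_cons] at h
    by_cases hm : pvIn marker l
    · simp [hm] at h
    · simp only [hm, Bool.false_eq_true, if_false, Option.map_eq_none_iff] at h
      simp [specBM, hm, ih h]

lemma bScan_findIdx (marker entry : String) (ls : List String) :
    ∀ i, ls.findIdx? (fun l => pvIn marker l) = some i →
      bScan ls entry (i + 1) = specBM marker entry ls := by
  induction ls with
  | nil => intro i h; simp at h
  | cons l ls ih =>
    intro i h
    rw [List.findIdx?_cons] at h
    by_cases hm : pvIn marker l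
    · simp only [hm, if_true] at h
      cases h
      rw [show (0 : Nat) + 1 = 0 + 1 from rfl, bScan_shift, bScan_zero]
      simp [specBM, hm]
    · simp only [hm, Bool.false_eq_true, if_false, Option.map_eq_some_iff] at h
      obtain ⟨i', hfi, rfl⟩ := h
      rw [bScan_shift, ih i' hfi]
      simp [specBM, hm]

-- ---- the recursive form of the change/exclusion conditions ----

def dSepB (marker : String) : List String → Bool
  | [] => false
  | [l] => pvSepRow l
  | l :: l' :: ls => if pvSepRow l then (pvIn marker l || pvIn marker l') else dSepB marker (l' :: ls)

def dMarkB (marker : String) : List String → Bool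
  | [] => false
  | l :: ls => if pvIn marker l then dSepB marker ls else dMarkB marker ls

lemma findIdx?_facts (p : String → Bool) (ls : List String) :
    ∀ j, ls.findIdx? p = some j →
      j < ls.length ∧ p (ls.getD j "") = true ∧ ls.getD j "" ∈ ls := by
  induction ls with
  | nil => intro j h; simp at h
  | cons l ls ih =>
    intro j h
    rw [List.findIdx?_cons] at h
    by_cases hp : p l
    · simp only [hp, if_true, Option.some.injEq] at h
      subst h
      exact ⟨by simp, by simpa using hp, by simp⟩
    · simp only [hp, Bool.false_eq_true, if_false, Option.map_eq_some_iff] at h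
      obtain ⟨j', hfi, rfl⟩ := h
      obtain ⟨h1, h2, h3⟩ := ih j' hfi
      refine ⟨by simp only [List.length_cons]; omega, by simpa using h2, ?_⟩
      simpa using List.mem_cons_of_mem l h3

lemma dSepB_char (marker : String) (ls : List String) :
    dSepB marker ls
      = (ls.findIdx? pvSepRow).any
          (fun j => pvIn marker (ls.getD j "") || ls[j + 1]?.all (pvIn marker)) := by
  induction ls with
  | nil => simp [dSepB]
  | cons l ls ih =>
    by_cases hs : pvSepRow l
    · cases ls with
      | nil => simp [dSepB, hs, List.findIdx?_cons, Option.any]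
      | cons l' ls' => simp [dSepB, hs, List.findIdx?_cons, Option.any]
    · cases ls with
      | nil => simp [dSepB, hs, List.findIdx?_cons]
      | cons l' ls' =>
        simp only [dSepB, hs]
        rw [ih]
        cases hfi : List.findIdx? pvSepRow (l' :: ls') with
        | none => simp [List.findIdx?_cons, hs, hfi, Option.any]
        | some j => simp [List.findIdx?_cons, hs, hfi, Option.any]

lemma dSepB_or (marker : String) (ts : List String) :
    dSepB marker ts
      = (((ts.findIdx? pvSepRow).any fun j =>
            pvIn marker (ts.getD j "") || ts[j + 1]?.any (pvIn marker))
          || ((ts.findIdx? pvSepRow).any fun j => decide (j + 1 = ts.length))) := by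
  rw [dSepB_char]
  cases hfi : ts.findIdx? pvSepRow with
  | none => simp [Option.any]
  | some j =>
    have hj := (findIdx?_facts pvSepRow ts j hfi).1
    cases hje : ts[j + 1]? with
    | none =>
      have hlen : j + 1 = ts.length := by
        have := List.getElem?_eq_none_iff.mp hje
        omega
      simp [Option.any, Option.all, hje, hlen]
    | some x =>
      have hlt : j + 1 < ts.length := (List.getElem?_eq_some_iff.mp hje).1
      have hlen : ¬ (j + 1 = ts.length) := by omega
      simp [Option.any, Option.all, hje, hlen, Bool.or_assoc]

lemma dMarkB_any (marker : String) (ls : List String) :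
    dMarkB marker ls
      = (ls.findIdx? (pvIn marker)).any (fun i => dSepB marker (ls.drop (i + 1))) := by
  induction ls with
  | nil => simp [dMarkB]
  | cons l ls ih =>
    by_cases hm : pvIn marker l
    · simp [dMarkB, hm, List.findIdx?_cons, Option.any]
    · simp only [dMarkB, hm]
      rw [ih]
      cases hfi : List.findIdx? (pvIn marker) ls with
      | none => simp [List.findIdx?_cons, hm, hfi, Option.any]
      | some i => simp [List.findIdx?_cons, hm, hfi, Option.any]

lemma dMarkB_or (marker : String) (ls : List String) :
    dMarkB marker ls = (badB marker ls || lastB marker ls) := by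
  rw [dMarkB_any]
  unfold badB lastB
  cases hfi : ls.findIdx? (pvIn marker) with
  | none => simp [Option.any]
  | some i => simp only [Option.any]; exact dSepB_or marker (ls.drop (i + 1))

-- ---- core: outside D_, A's and B's line lists coincide ----

lemma specSep_eq_specB (marker entry : String) (ls : List String)
    (hd : dSepB marker ls = false) :
    specSep marker entry ls = specB entry ls := by
  induction ls with
  | nil => simp [specSep, specB]
  | cons l ls ih =>
    by_cases hs : pvSepRow l
    · cases ls with
      | nil => simp [dSepB, hs] at hd
      | cons l' ls' =>
        simp only [dSepB, hs, if_true, Bool.or_eq_false_iff] at hd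
        obtain ⟨hm, hm'⟩ := hd
        simp [specSep, specB, specTgt, hs, hm, hm']
    · have hd' : dSepB marker ls = false := by
        cases ls with
        | nil => simp [dSepB]
        | cons l' ls' => simpa [dSepB, hs] using hd
      by_cases hm : pvIn marker l
      · simp [specSep, specB, hs, hm, ih hd']
      · simp [specSep, specB, hs, hm, ih hd']

lemma specMark_eq_specBM (marker entry : String) (ls : List String)
    (hd : dMarkB marker ls = false) :
    specMark marker entry ls = specBM marker entry ls := by
  induction ls with
  | nil => simp [specMark, specBM]
  | cons l ls ih =>
    by_cases hm : pvIn marker l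
    · simp only [dMarkB, hm, if_true] at hd
      simp [specMark, specBM, hm, specSep_eq_specB marker entry ls hd]
    · simp only [dMarkB, hm, Bool.false_eq_true, if_false] at hd
      simp [specMark, specBM, hm, ih hd]

-- ---- tightness: inside Pre_ ∧ D_, A leaves the lines unchanged while B inserts one line ----

lemma specSep_id (marker entry : String) (ts : List String) :
    ∀ j, ts.findIdx? pvSepRow = some j → j + 1 = ts.length →
      pvIn marker (ts.getD j "") = false → specSep marker entry ts = ts := by
  induction ts with
  | nil => intro j h; simp at h
  | cons l ts ih =>
    intro j h hlast hm
    rw [List.findIdx?_cons] at h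
    by_cases hs : pvSepRow l
    · simp only [hs, if_true, Option.some.injEq] at h
      subst h
      have hnil : ts = [] := by
        simp only [List.length_cons] at hlast
        exact List.eq_nil_of_length_eq_zero (by omega)
      subst hnil
      simp only [List.getD_cons_zero] at hm
      simp [specSep, specTgt, hs, hm]
    · simp only [hs, Bool.false_eq_true, if_false, Option.map_eq_some_iff] at h
      obtain ⟨j', hfi, rfl⟩ := h
      have hlast' : j' + 1 = ts.length := by
        simp only [List.length_cons] at hlast; omega
      have hm' : pvIn marker (ts.getD j' "") = false := by simpa using hm
      have hrec := ih j' hfi hlast' hm'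
      by_cases hml : pvIn marker l
      · simp [specSep, hml, hrec]
      · simp [specSep, hml, hs, hrec]

lemma specMark_id (marker entry : String) (ls : List String) :
    ∀ i, ls.findIdx? (pvIn marker) = some i →
      (∀ j, (ls.drop (i + 1)).findIdx? pvSepRow = some j →
        j + 1 = (ls.drop (i + 1)).length ∧ pvIn marker ((ls.drop (i + 1)).getD j "") = false) →
      specMark marker entry ls = ls := by
  induction ls with
  | nil => intro i h; simp at h
  | cons l ls ih =>
    intro i h hsep
    rw [List.findIdx?_cons] at h
    by_cases hm : pvIn marker l
    · simp only [hm, if_true, Option.some.injEq] at h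
      subst h
      simp only [List.drop_succ_cons, List.drop_zero] at hsep
      have : specSep marker entry ls = ls := by
        cases hfi : ls.findIdx? pvSepRow with
        | none =>
          -- no separator at all: specSep is the identity by induction
          clear hsep ih
          induction ls with
          | nil => simp [specSep]
          | cons l' ls' ih' =>
            rw [List.findIdx?_cons] at hfi
            by_cases hs : pvSepRow l'
            · simp [hs] at hfi
            · simp only [hs, Bool.false_eq_true, if_false, Option.map_eq_none_iff] at hfi
              by_cases hml : pvIn marker l'
              · simp [specSep, hml, hs, ih' hfi]
              · simp [specSep, hml, hs, ih' hfi]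
        | some j =>
          obtain ⟨h1, h2⟩ := hsep j hfi
          exact specSep_id marker entry ls j hfi h1 h2
      simp [specMark, hm, this]
    · simp only [hm, Bool.false_eq_true, if_false, Option.map_eq_some_iff] at h
      obtain ⟨i', hfi, rfl⟩ := h
      have hsep' : ∀ j, (ls.drop (i' + 1)).findIdx? pvSepRow = some j →
          j + 1 = (ls.drop (i' + 1)).length ∧ pvIn marker ((ls.drop (i' + 1)).getD j "") = false := by
        intro j hj
        simpa using hsep j (by simpa using hj)
      simp [specMark, hm, ih i' hfi hsep']

lemma specB_stats (entry : String) (ts : List String)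
    (h : ∃ l ∈ ts, pvSepRow l = true) :
    (specB entry ts).length = ts.length + 1 ∧
      ((specB entry ts).map (fun s => s.toList.length)).sum
        = (ts.map (fun s => s.toList.length)).sum + entry.toList.length := by
  induction ts with
  | nil => simp at h
  | cons l ts ih =>
    by_cases hs : pvSepRow l
    · constructor
      · simp [specB, hs]
      · simp only [specB, hs, if_true, List.map_cons, List.sum_cons]
        omega
    · have h' : ∃ l ∈ ts, pvSepRow l = true := by
        obtain ⟨x, hx, hpx⟩ := h
        rcases List.mem_cons.mp hx with rfl | hx'
        · exact absurd hpx (by simp [hs])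
        · exact ⟨x, hx', hpx⟩
      obtain ⟨h1, h2⟩ := ih h'
      constructor
      · simp [specB, hs, h1]
      · simp only [specB, hs, Bool.false_eq_true, if_false, List.map_cons, List.sum_cons]
        omega

lemma specBM_stats (marker entry : String) (ls : List String) :
    ∀ i, ls.findIdx? (pvIn marker) = some i →
      (∃ l ∈ ls.drop (i + 1), pvSepRow l = true) →
      (specBM marker entry ls).length = ls.length + 1 ∧
        ((specBM marker entry ls).map (fun s => s.toList.length)).sum
          = (ls.map (fun s => s.toList.length)).sum + entry.toList.length := by
  induction ls with
  | nil => intro i h; simp at h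
  | cons l ls ih =>
    intro i h hex
    rw [List.findIdx?_cons] at h
    by_cases hm : pvIn marker l
    · simp only [hm, if_true, Option.some.injEq] at h
      subst h
      simp only [List.drop_succ_cons, List.drop_zero] at hex
      obtain ⟨h1, h2⟩ := specB_stats entry ls hex
      constructor
      · simp [specBM, hm, h1]
      · simp only [specBM, hm, if_true, List.map_cons, List.sum_cons, h2]
        omega
    · simp only [hm, Bool.false_eq_true, if_false, Option.map_eq_some_iff] at h
      obtain ⟨i', hfi, rfl⟩ := h
      obtain ⟨h1, h2⟩ := ih i' hfi (by simpa using hex)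
      constructor
      · simp [specBM, hm, h1]
      · simp only [specBM, hm, Bool.false_eq_true, if_false, List.map_cons, List.sum_cons, h2]
        omega

lemma chars_join_length (s : List Char) :
    ∀ l : List (List Char), l ≠ [] →
      (PySem.Chars.join s l).length = (l.map List.length).sum + s.length * (l.length - 1) := by
  intro l
  induction l with
  | nil => intro h; exact absurd rfl h
  | cons a l ih =>
    intro _
    cases l with
    | nil => simp [PySem.Chars.join_singleton]
    | cons b l =>
      rw [PySem.Chars.join_cons_cons, List.length_append, List.length_append, ih (by simp)]
      simp only [List.map_cons, List.sum_cons, List.length_cons, Nat.add_sub_cancel]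
      ring

-- the two joined strings differ because the line lists have different total size
lemma join_ne_of_stats (xs ys : List String) (e : Nat)
    (hx : xs ≠ [])
    (hlen : ys.length = xs.length + 1)
    (hsum : (ys.map (fun s => s.toList.length)).sum
      = (xs.map (fun s => s.toList.length)).sum + e) :
    PySem.Str.join "\n" xs ≠ PySem.Str.join "\n" ys := by
  intro heq
  have hy : ys ≠ [] := by
    intro h
    rw [h] at hlen
    simp at hlen
  have h1 : (PySem.Str.join "\n" xs).toList = (PySem.Str.join "\n" ys).toList := by rw [heq]
  rw [PySem.Str.toList_join, PySem.Str.toList_join] at h1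
  have h2 := congrArg List.length h1
  rw [chars_join_length _ _ (by simpa using hx),
      chars_join_length _ _ (by simpa using hy)] at h2
  simp only [List.map_map, List.length_map, Function.comp_def] at h2
  rw [show ("\n".toList.length) = 1 from by decide, one_mul, one_mul, hlen, hsum] at h2
  have hxs : 0 < xs.length := List.length_pos_iff.mpr hx
  omega

-- ===== VERDICT (by name: the statements are the Claim_ definitions above) =====
theorem insert_after_table_header_spec : Claim_unchanged_insert_after_table_header := by
  intro content marker entry _hdom hpre hnd
  unfold Pre_insert_after_table_header at hpre
  unfold D_insert_after_table_header at hnd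
  unfold insert_after_table_header insert_after_table_header_alt
  cases h : pvIn marker content
  · simp
  · simp only [Bool.not_true, Bool.false_eq_true, if_false]
    rw [foldl_stepA_mark]
    have hlast : lastB marker (pvSplitNL content) = false := by
      cases hx : lastB marker (pvSplitNL content)
      · rfl
      · exact absurd (by rw [h, hx]; rfl) hnd
    have hd : dMarkB marker (pvSplitNL content) = false := by
      rw [dMarkB_or, hpre, hlast]; rfl
    rw [specMark_eq_specBM marker entry _ hd]
    cases hf : (pvSplitNL content).findIdx? (fun l => pvIn marker l) with
    | none => rw [specBM_no_marker marker entry _ hf]; simp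
    | some i => rw [← bScan_findIdx marker entry _ i hf]; simp

theorem insert_after_table_header_changed : Claim_changed_insert_after_table_header := by
  unfold Claim_changed_insert_after_table_header
  refine ⟨by decide, by decide, by decide, by decide, ?_, by decide⟩
  show insert_after_table_header_alt "m\n|---" "m" "e" = "m\n|---\ne"
  have e1 : pvSplitNL "m\n|---" = ["m", "|---"] := by decide
  have e2 : List.findIdx? (fun l => pvIn "m" l) ["m", "|---"] = some 0 := by decide
  simp only [insert_after_table_header_alt, e1, e2,
    show (!pvIn "m" "m\n|---") = false from by decide, Bool.false_eq_true, if_false]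
  rw [bScan_shift, bScan_zero]
  decide

theorem insert_after_table_header_tight : Claim_exact_insert_after_table_header := by
  intro content marker entry _hdom hpre hd
  unfold Pre_insert_after_table_header at hpre
  unfold D_insert_after_table_header at hd
  rw [Bool.and_eq_true] at hd
  obtain ⟨hin, hlast⟩ := hd
  unfold insert_after_table_header insert_after_table_header_alt
  rw [hin]
  simp only [Bool.not_true, Bool.false_eq_true, if_false]
  rw [foldl_stepA_mark]
  -- unpack lastB: a first marker line i, a first separator j in the tail, and j is last
  unfold lastB at hlast
  cases hfi : (pvSplitNL content).findIdx? (fun l => pvIn marker l) with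
  | none =>
    have hfi2 : (pvSplitNL content).findIdx? (pvIn marker) = none := hfi
    rw [hfi2] at hlast
    simp [Option.any] at hlast
  | some i =>
    have hfi2 : (pvSplitNL content).findIdx? (pvIn marker) = some i := hfi
    rw [hfi2] at hlast
    simp only [Option.any] at hlast
    cases hfj : ((pvSplitNL content).drop (i + 1)).findIdx? pvSepRow with
    | none => rw [hfj] at hlast; simp at hlast
    | some j =>
      rw [hfj] at hlast
      simp only [decide_eq_true_eq] at hlast
      -- unpack badB = false at the same i, j
      unfold badB at hpre
      rw [hfi2] at hpre
      simp only [Option.any] at hpre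
      rw [hfj] at hpre
      simp only [Option.any, Bool.or_eq_false_iff] at hpre
      obtain ⟨hm, _⟩ := hpre
      -- A's list is unchanged
      have hA : specMark marker entry (pvSplitNL content) = pvSplitNL content := by
        refine specMark_id marker entry _ i hfi2 ?_
        intro j' hj'
        rw [hfj] at hj'
        cases hj'
        exact ⟨hlast, hm⟩
      -- B's list has one more line
      have hsepmem : ∃ l ∈ (pvSplitNL content).drop (i + 1), pvSepRow l = true := by
        obtain ⟨_, h2, h3⟩ := findIdx?_facts pvSepRow _ j hfj
        exact ⟨((pvSplitNL content).drop (i + 1)).getD j "", h3, h2⟩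
      obtain ⟨hB1, hB2⟩ := specBM_stats marker entry (pvSplitNL content) i hfi2 hsepmem
      have hnil : pvSplitNL content ≠ [] := by
        intro h
        rw [h] at hfi2
        simp at hfi2
      show PySem.Str.join "\n" ([] ++ specMark marker entry (pvSplitNL content))
        ≠ PySem.Str.join "\n" (bScan (pvSplitNL content) entry (i + 1))
      rw [List.nil_append, hA, bScan_findIdx marker entry _ i hfi]
      exact join_ne_of_stats _ _ entry.toList.length hnil hB1 hB2
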